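-- pv_equiv track=rewrite | github.com/mariozenmedina/jumbled-pattern-matching | custom.py | get_summed
-- ===== SOURCE A (Python) =====
-- def get_summed(counted):
--     summed = []
--     window = 0
--     tot_1 = 0
--     for i,v in enumerate(counted):
--         window += v
--         if i % 2 == 0:
--             tot_1 += v
--         summed.append([window, tot_1])
--     return summed
-- ===== SOURCE B (Python) =====
-- from itertools import accumulate
--
-- def get_summed(counted):
--     # Deinterleave into the two stride-2 subsequences, prefix-sum each half
--     # independently, then reconstruct each row by index arithmetic:
--     # the even-index subtotal at i is ev[i // 2], and the running total is
--     # that plus the odd half's prefix od[(i - 1) // 2] (absent for i == 0).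
--     ev = list(accumulate(counted[0::2]))
--     od = list(accumulate(counted[1::2]))
--     out = []
--     for i in range(len(counted)):
--         e = ev[i // 2]
--         w = e + (od[(i - 1) // 2] if i >= 1 else 0)
--         out.append([w, e])
--     return out
-- ===== Notes on version B (the rewrite author's own statement) =====
-- stated objective: alternative
-- what changed: Instead of one loop carrying two running accumulators with a per-element parity test, B deinterleaves the input into its two stride-2 subsequences, prefix-sums each half independently, and reconstructs every row by index arithmetic (even subtotal = ev[i//2], running total = ev[i//2] + od[(i-1)//2]).
import Mathlib
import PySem

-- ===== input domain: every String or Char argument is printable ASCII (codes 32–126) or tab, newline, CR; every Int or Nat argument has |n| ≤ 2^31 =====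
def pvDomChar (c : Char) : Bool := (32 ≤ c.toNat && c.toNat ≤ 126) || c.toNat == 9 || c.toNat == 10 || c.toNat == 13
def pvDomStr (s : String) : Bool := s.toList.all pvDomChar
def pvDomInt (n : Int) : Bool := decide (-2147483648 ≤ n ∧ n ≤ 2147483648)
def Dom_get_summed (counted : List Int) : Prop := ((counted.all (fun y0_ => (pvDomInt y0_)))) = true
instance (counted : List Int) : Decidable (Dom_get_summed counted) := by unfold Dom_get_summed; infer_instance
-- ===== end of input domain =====

-- B deinterleaves the input into its two stride-2 halves, prefix-sums each half, and rebuilds every row by index arithmetic, instead of A's single loop with two running accumulators; objective: alternative, not faster.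

-- ===== PORT A =====
-- A's fused loop: index i, running total window, even-index subtotal tot
def get_summed_go : List Int → Int → Int → Int → List (List Int)
  | [], _, _, _ => []
  | v :: rest, i, window, tot =>
    let window' := window + v
    let tot' := if i % 2 = 0 then tot + v else tot
    [window', tot'] :: get_summed_go rest (i + 1) window' tot'

def get_summed (counted : List Int) : List (List Int) :=
  get_summed_go counted 0 0 0

-- ===== PORT B =====
-- hand port of a step-2 slice xs[0::2] (exact for step 2, start 0, no stop)
def everyOther : List Int → List Int
  | [] => []
  | [x] => [x]
  | x :: _ :: r => x :: everyOther r

-- list(accumulate(xs)) continuing from running sum acc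
def pvScanAdd : List Int → Int → List Int
  | [], _ => []
  | v :: rest, acc => (acc + v) :: pvScanAdd rest (acc + v)

def get_summed_alt (counted : List Int) : List (List Int) :=
  let ev := pvScanAdd (everyOther counted) 0            -- list(accumulate(counted[0::2]))
  let od := pvScanAdd (everyOther counted.tail) 0       -- list(accumulate(counted[1::2]))
  (List.range counted.length).map (fun i =>
    -- ev[i//2] and od[(i-1)//2]: both indices are always in range (Nat division = Python // here since i ≥ 1 when od is read), so the getD default is never used
    let e := ev.getD (i / 2) 0
    let w := e + (if 1 ≤ i then od.getD ((i - 1) / 2) 0 else 0)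
    [w, e])

-- ===== PRECONDITION & SPEC =====
def Spec_get_summed (counted : List Int) (out : List (List Int)) : Prop := out = get_summed_alt counted
instance (counted : List Int) (out : List (List Int)) : Decidable (Spec_get_summed counted out) := by unfold Spec_get_summed; infer_instance

-- ===== CLAIM (what is proved, stated in full; the proofs are below) =====
def Claim_equal_get_summed : Prop := ∀ (counted : List Int), Dom_get_summed counted → Spec_get_summed counted (get_summed counted)

-- ===== LEMMAS AND PROOFS =====
-- sum of the elements at positions of given parity (true = even position)
def esum : Bool → List Int → Int
  | _, [] => 0
  | b, x :: r => (if b then x else 0) + esum (!b) r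

theorem esum_true_eq : ∀ (l : List Int), esum true l = (everyOther l).sum := by
  intro l
  induction l using everyOther.induct with
  | case1 => simp [esum, everyOther]
  | case2 x => simp [esum, everyOther]
  | case3 x y r ih => simp [esum, everyOther, ih]

theorem esum_false_eq (l : List Int) : esum false l = esum true l.tail := by
  cases l with
  | nil => simp [esum]
  | cons x r => simp [esum]

theorem esum_split : ∀ (l : List Int), esum true l + esum false l = l.sum := by
  intro l
  induction l with
  | nil => simp [esum]
  | cons x r ih => simp [esum]; omega

theorem parity_flip (i : Int) : (!decide (i % 2 = 0)) = decide ((i + 1) % 2 = 0) := by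
  by_cases h : i % 2 = 0
  · simp [h]; omega
  · simp [h]; omega

-- A's loop as a map over the index range
theorem get_summed_go_eq (counted : List Int) :
    ∀ (i w t : Int), get_summed_go counted i w t =
      (List.range counted.length).map
        (fun k => [w + (counted.take (k + 1)).sum,
                   t + esum (decide (i % 2 = 0)) (counted.take (k + 1))]) := by
  induction counted with
  | nil => intro i w t; simp [get_summed_go]
  | cons v rest ih =>
    intro i w t
    simp only [get_summed_go, List.length_cons, List.range_succ_eq_map, List.map_cons,
      List.map_map, ih (i + 1), ← parity_flip i]
    refine List.cons_eq_cons.mpr ⟨?_, ?_⟩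
    · by_cases h : i % 2 = 0 <;> simp [esum, h]
    · apply List.map_congr_left
      intro k _
      simp only [Function.comp]
      have htake : (v :: rest).take (k + 1 + 1) = v :: rest.take (k + 1) := rfl
      simp only [htake, List.sum_cons, esum]
      refine List.cons_eq_cons.mpr ⟨by ring, List.cons_eq_cons.mpr ⟨?_, rfl⟩⟩
      by_cases h : i % 2 = 0 <;> simp [h] <;> ring

-- B's accumulate ports as maps over the index range
theorem pvScanAdd_eq (xs : List Int) :
    ∀ (a : Int), pvScanAdd xs a =
      (List.range xs.length).map (fun j => a + (xs.take (j + 1)).sum) := by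
  induction xs with
  | nil => intro a; simp [pvScanAdd]
  | cons v rest ih =>
    intro a
    simp only [pvScanAdd, List.length_cons, List.range_succ_eq_map, List.map_cons,
      List.map_map, ih (a + v)]
    refine List.cons_eq_cons.mpr ⟨by simp, ?_⟩
    apply List.map_congr_left
    intro k _
    simp [Function.comp, add_assoc]

theorem everyOther_length : ∀ (l : List Int), (everyOther l).length = (l.length + 1) / 2 := by
  intro l
  induction l using everyOther.induct with
  | case1 => simp [everyOther]
  | case2 x => simp [everyOther]
  | case3 x y r ih => simp [everyOther, ih]; omega

theorem everyOther_take : ∀ (l : List Int) (k : Nat),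
    everyOther (l.take (k + 1)) = (everyOther l).take (k / 2 + 1) := by
  intro l
  induction l using everyOther.induct with
  | case1 => intro k; simp [everyOther]
  | case2 x => intro k; simp [everyOther]
  | case3 x y r ih =>
    intro k
    match k with
    | 0 => simp [everyOther]
    | 1 => simp [everyOther]
    | (m + 2) =>
      have h1 : (x :: y :: r).take (m + 2 + 1) = x :: y :: r.take (m + 1) := rfl
      have h2 : (m + 2) / 2 + 1 = (m / 2 + 1) + 1 := by omega
      rw [h1]; simp only [everyOther, h2, ih m, List.take_succ_cons]

-- ===== VERDICT (by name: the statement is the Claim_ definition above) =====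
theorem get_summed_spec : Claim_equal_get_summed := by
  intro counted _
  unfold Spec_get_summed get_summed get_summed_alt
  rw [get_summed_go_eq counted 0 0 0]
  simp only [pvScanAdd_eq, zero_add]
  apply List.map_congr_left
  intro k hk
  rw [List.mem_range] at hk
  simp only [show (decide ((0:Int) % 2 = 0)) = true from by norm_num]
  -- evaluate the two getD lookups
  have hev : ((List.range (everyOther counted).length).map
      (fun j => ((everyOther counted).take (j + 1)).sum)).getD (k / 2) 0
      = ((everyOther counted).take (k / 2 + 1)).sum := by
    have hlt : k / 2 < (everyOther counted).length := by
      rw [everyOther_length]; omega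
    simp [List.getD, hlt]
  have he : ((everyOther counted).take (k / 2 + 1)).sum = esum true (counted.take (k + 1)) := by
    rw [← everyOther_take, ← esum_true_eq]
  refine List.cons_eq_cons.mpr ⟨?_, List.cons_eq_cons.mpr ⟨by rw [hev, he], rfl⟩⟩
  rw [hev, he]
  by_cases hk1 : 1 ≤ k
  · have hod : ((List.range (everyOther counted.tail).length).map
        (fun j => ((everyOther counted.tail).take (j + 1)).sum)).getD ((k - 1) / 2) 0
        = ((everyOther counted.tail).take ((k - 1) / 2 + 1)).sum := by
      have hlt : (k - 1) / 2 < (everyOther counted.tail).length := by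
        rw [everyOther_length, List.length_tail]; omega
      simp [List.getD, hlt]
    have ht : counted.tail.take ((k - 1) + 1) = (counted.take (k + 1)).tail := by
      cases counted with
      | nil => simp
      | cons c cs => simp; congr 1; omega
    have ho : ((everyOther counted.tail).take ((k - 1) / 2 + 1)).sum
        = esum false (counted.take (k + 1)) := by
      rw [← everyOther_take, ← esum_true_eq, ht, ← esum_false_eq]
    simp only [hk1, if_pos, hod, ho]
    rw [← esum_split (counted.take (k + 1))]
  · have hk0 : k = 0 := by omega
    subst hk0
    cases counted with
    | nil => simp at hk
    | cons c cs => simp [esum]
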